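-- pv_equiv track=rewrite | github.com/kim-kiwon/Programmers | 2020 카카오 인턴십/키패드 누르기.py | solution
-- ===== SOURCE A (Python) =====
-- from collections import deque
--
-- dx = [-1, 0, 1, 0]
--
-- dy = [0, -1, 0, 1]
--
-- def solution(numbers, hand):
--     data = [[1, 2, 3], [4, 5, 6], [7, 8, 9], [-1, 0, -1]]
--     ll, rl = [3, 0], [3, 2]
--     answer = ""
--     for i in numbers:
--         if i in [1, 4, 7]:
--             answer += "L"
--             if i == 1:
--                 ll = [0, 0]
--             elif i == 4:
--                 ll = [1, 0]
--             else:
--                 ll = [2, 0]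
--         elif i in [2, 5, 8, 0]:
--             q = deque()
--             visited = [[0] * 3 for _ in range(4)]
--             visited[ll[0]][ll[1]] = 1
--             q.append(ll)
--             while q:
--                 x, y = q.popleft()
--                 if data[x][y] == i:
--                     lc = visited[x][y] - 1
--                     break
--                 for d in range(4):
--                     nx = x + dx[d]
--                     ny = y + dy[d]
--                     if 0 <= nx < 4 and 0 <= ny < 3:
--                         if visited[nx][ny] == 0:
--                             q.append([nx, ny])
--                             visited[nx][ny] = visited[x][y] + 1
--
--             q = deque()
--             visited = [[0] * 3 for _ in range(4)]
--             visited[rl[0]][rl[1]] = 1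
--             q.append(rl)
--             while q:
--                 x, y = q.popleft()
--                 if data[x][y] == i:
--                     rc = visited[x][y] - 1
--                     break
--                 for d in range(4):
--                     nx = x + dx[d]
--                     ny = y + dy[d]
--                     if 0 <= nx < 4 and 0 <= ny < 3:
--                         if visited[nx][ny] == 0:
--                             q.append([nx, ny])
--                             visited[nx][ny] = visited[x][y] + 1
--
--             if lc < rc:
--                 answer += "L"
--                 ch = 0
--             elif lc > rc:
--                 answer += "R"
--                 ch = 1
--             else:
--                 if hand == "left":
--                     answer += "L"
--                     ch = 0
--                 else:
--                     answer += "R"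
--                     ch = 1
--             if i == 2:
--                 if ch == 0:
--                     ll = [0, 1]
--                 else:
--                     rl = [0, 1]
--             elif i == 5:
--                 if ch == 0:
--                     ll = [1, 1]
--                 else:
--                     rl = [1, 1]
--             elif i == 8:
--                 if ch == 0:
--                     ll = [2, 1]
--                 else:
--                     rl = [2, 1]
--             else:
--                 if ch == 0:
--                     ll = [3, 1]
--                 else:
--                     rl = [3, 1]
--         elif i in [3, 6, 9]:
--             answer += "R"
--             if i == 3:
--                 rl = [0, 2]
--             elif i == 6:
--                 rl = [1, 2]
--             else:
--                 rl = [2, 2]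
--     return answer
-- ===== SOURCE B (Python) =====
-- def solution(numbers, hand):
--     def pos(n):
--         return (3, 1) if n == 0 else ((n - 1) // 3, (n - 1) % 3)
--     l, r = (3, 0), (3, 2)
--     out = []
--     for n in numbers:
--         if n in (1, 4, 7):
--             l = pos(n)
--             out.append("L")
--         elif n in (3, 6, 9):
--             r = pos(n)
--             out.append("R")
--         elif n in (2, 5, 8, 0):
--             p = pos(n)
--             dl = abs(l[0] - p[0]) + abs(l[1] - p[1])
--             dr = abs(r[0] - p[0]) + abs(r[1] - p[1])
--             if dl < dr or (dl == dr and hand == "left"):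
--                 l = p
--                 out.append("L")
--             else:
--                 r = p
--                 out.append("R")
--     return "".join(out)
-- ===== Notes on version B (the rewrite author's own statement) =====
-- stated objective: simpler
-- what changed: Replaces A's two per-digit BFS searches over the 4x3 keypad (queue + visited matrix) and its digit-by-digit position tables with a closed-form position formula and a direct Manhattan-distance comparison, accumulating the answer as a joined list.
import Mathlib
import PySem

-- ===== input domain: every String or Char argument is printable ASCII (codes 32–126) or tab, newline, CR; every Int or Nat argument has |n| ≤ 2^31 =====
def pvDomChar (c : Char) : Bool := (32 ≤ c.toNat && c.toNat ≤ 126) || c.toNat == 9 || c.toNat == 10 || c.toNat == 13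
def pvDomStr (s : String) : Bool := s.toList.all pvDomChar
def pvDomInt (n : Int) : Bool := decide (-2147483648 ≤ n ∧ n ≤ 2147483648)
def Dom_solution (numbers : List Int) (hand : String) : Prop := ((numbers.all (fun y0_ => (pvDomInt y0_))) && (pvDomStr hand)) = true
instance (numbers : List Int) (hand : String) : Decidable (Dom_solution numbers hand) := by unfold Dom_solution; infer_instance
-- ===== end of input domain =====

-- B replaces A's per-digit BFS over the keypad grid by a closed-form position formula and a
-- Manhattan-distance comparison on fixed coordinates (objective: simpler).


-- ===== PORT A =====
def pvDxs : List Int := [-1, 0, 1, 0]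
def pvDys : List Int := [0, -1, 0, 1]
def pvData : List (List Int) := [[1,2,3],[4,5,6],[7,8,9],[-1,0,-1]]

-- visited[x][y] / data[x][y]; indices are non-negative and in range wherever A reads them,
-- so getD with .toNat is exact here.
def pvG (v : List (List Int)) (x y : Int) : Int := (v.getD x.toNat []).getD y.toNat 0
def pvS (v : List (List Int)) (x y val : Int) : List (List Int) :=
  v.set x.toNat ((v.getD x.toNat []).set y.toNat val)

-- A's BFS while-loop; each cell is enqueued at most once (visited guard), so at most 12 pops:
-- fuel 12 never runs out on the inputs A's loop actually receives. The fuel-out / empty-queue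
-- values 0 correspond to states Python never reaches (there it would raise NameError).
def pvBfs (i : Int) : Nat → List (Int × Int) → List (List Int) → Int
  | 0, _, _ => 0
  | _ + 1, [], _ => 0
  | fuel + 1, (x, y) :: q, visited =>
    if pvG pvData x y = i then pvG visited x y - 1
    else
      let st := (List.range 4).foldl
        (fun (st : List (Int × Int) × List (List Int)) d =>
          let nx := x + pvDxs.getD d 0
          let ny := y + pvDys.getD d 0
          if 0 ≤ nx ∧ nx < 4 ∧ 0 ≤ ny ∧ ny < 3 then
            if pvG st.2 nx ny = 0 then
              (st.1 ++ [(nx, ny)], pvS st.2 nx ny (pvG visited x y + 1))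
            else st
          else st) (q, visited)
      pvBfs i fuel st.1 st.2

def pvVisInit (p : Int × Int) : List (List Int) :=
  pvS [[0,0,0],[0,0,0],[0,0,0],[0,0,0]] p.1 p.2 1

def pvBfsFrom (p : Int × Int) (i : Int) : Int := pvBfs i 12 [p] (pvVisInit p)

def pvStepA (hand : String) (st : List Char × (Int × Int) × (Int × Int)) (i : Int) :
    List Char × (Int × Int) × (Int × Int) :=
  let answer := st.1; let ll := st.2.1; let rl := st.2.2
  if i = 1 ∨ i = 4 ∨ i = 7 then
    (answer ++ ['L'], (if i = 1 then ((0:Int), (0:Int)) else if i = 4 then (1, 0) else (2, 0)), rl)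
  else if i = 2 ∨ i = 5 ∨ i = 8 ∨ i = 0 then
    let lc := pvBfsFrom ll i
    let rc := pvBfsFrom rl i
    let ch : Int := if lc < rc then 0 else if lc > rc then 1 else if hand = "left" then 0 else 1
    let np : Int × Int := if i = 2 then (0, 1) else if i = 5 then (1, 1) else if i = 8 then (2, 1) else (3, 1)
    (answer ++ (if ch = 0 then ['L'] else ['R']),
     (if ch = 0 then np else ll), (if ch = 0 then rl else np))
  else if i = 3 ∨ i = 6 ∨ i = 9 then
    (answer ++ ['R'], ll, (if i = 3 then ((0:Int), (2:Int)) else if i = 6 then (1, 2) else (2, 2)))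
  else st

def solution (numbers : List Int) (hand : String) : String :=
  String.ofList (numbers.foldl (pvStepA hand) ([], ((3:Int), (0:Int)), ((3:Int), (2:Int)))).1

-- ===== PORT B =====
def pvPos (n : Int) : Int × Int :=
  if n = 0 then (3, 1) else (PySem.Int.floordiv (n - 1) 3, PySem.Int.mod (n - 1) 3)

def pvManh (a b : Int × Int) : Int := |a.1 - b.1| + |a.2 - b.2|

def pvStepB (hand : String) (st : List (List Char) × (Int × Int) × (Int × Int)) (n : Int) :
    List (List Char) × (Int × Int) × (Int × Int) :=
  let out := st.1; let l := st.2.1; let r := st.2.2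
  if n = 1 ∨ n = 4 ∨ n = 7 then (out ++ [['L']], pvPos n, r)
  else if n = 3 ∨ n = 6 ∨ n = 9 then (out ++ [['R']], l, pvPos n)
  else if n = 2 ∨ n = 5 ∨ n = 8 ∨ n = 0 then
    let p := pvPos n
    let dl := pvManh l p
    let dr := pvManh r p
    if dl < dr ∨ (dl = dr ∧ hand = "left") then (out ++ [['L']], p, r)
    else (out ++ [['R']], l, p)
  else st

def solution_alt (numbers : List Int) (hand : String) : String :=
  String.ofList ((numbers.foldl (pvStepB hand) ([], ((3:Int), (0:Int)), ((3:Int), (2:Int)))).1).flatten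

-- ===== PRECONDITION & SPEC =====
def Spec_solution (numbers : List Int) (hand : String) (out : String) : Prop := out = solution_alt numbers hand
instance (numbers : List Int) (hand : String) (out : String) : Decidable (Spec_solution numbers hand out) := by unfold Spec_solution; infer_instance

-- ===== CLAIM (what is proved, stated in full; the proofs are below) =====
def Claim_equal_solution : Prop := ∀ (numbers : List Int) (hand : String), Dom_solution numbers hand → Spec_solution numbers hand (solution numbers hand)

-- ===== LEMMAS AND PROOFS =====

-- the positions the left / right thumb can ever occupy
def pvLP : List (Int × Int) := [(3,0),(0,0),(1,0),(2,0),(0,1),(1,1),(2,1),(3,1)]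
def pvRP : List (Int × Int) := [(3,2),(0,2),(1,2),(2,2),(0,1),(1,1),(2,1),(3,1)]

-- BFS distance on the 4×3 keypad equals Manhattan distance, for every reachable state
lemma pvBfs_eq_manh : ∀ p ∈ pvLP ++ pvRP, ∀ d ∈ ([2,5,8,0] : List Int),
    pvBfsFrom p d = pvManh p (pvPos d) := by decide

lemma pvStep_eq (hand : String) (ans : List Char) (out : List (List Char))
    (ll rl : Int × Int) (hl : ll ∈ pvLP) (hr : rl ∈ pvRP) (hf : ans = out.flatten) (i : Int) :
    (pvStepA hand (ans, ll, rl) i).1 = ((pvStepB hand (out, ll, rl) i).1).flatten ∧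
    (pvStepA hand (ans, ll, rl) i).2 = (pvStepB hand (out, ll, rl) i).2 ∧
    (pvStepB hand (out, ll, rl) i).2.1 ∈ pvLP ∧ (pvStepB hand (out, ll, rl) i).2.2 ∈ pvRP := by
  by_cases h1 : i = 1 ∨ i = 4 ∨ i = 7
  · rcases h1 with h | h | h <;> subst h <;>
      simp [pvStepA, pvStepB, List.flatten_append, hf, hl, hr] <;> decide
  by_cases h2 : i = 2 ∨ i = 5 ∨ i = 8 ∨ i = 0
  · rcases h2 with h | h | h | h <;> subst h
    · have hbl := pvBfs_eq_manh ll (List.mem_append_left _ hl) (2 : Int) (by decide)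
      have hbr := pvBfs_eq_manh rl (List.mem_append_right _ hr) (2 : Int) (by decide)
      rcases lt_trichotomy (pvManh ll (pvPos (2 : Int))) (pvManh rl (pvPos (2 : Int))) with hc | hc | hc
      · simp [pvStepA, pvStepB, List.flatten_append, hf, hl, hr, hbl, hbr, hc,
              lt_asymm hc, ne_of_lt hc] <;> first
          | (constructor <;> first | decide | assumption)
          | decide
          | assumption
      · by_cases hh : hand = "left" <;>
          simp [pvStepA, pvStepB, List.flatten_append, hf, hl, hr, hbl, hbr, hc, hh,
                lt_irrefl] <;> first
          | (constructor <;> first | decide | assumption)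
          | decide
          | assumption
      · simp [pvStepA, pvStepB, List.flatten_append, hf, hl, hr, hbl, hbr, hc,
              lt_asymm hc, ne_of_gt hc] <;> first
          | (constructor <;> first | decide | assumption)
          | decide
          | assumption
    · have hbl := pvBfs_eq_manh ll (List.mem_append_left _ hl) (5 : Int) (by decide)
      have hbr := pvBfs_eq_manh rl (List.mem_append_right _ hr) (5 : Int) (by decide)
      rcases lt_trichotomy (pvManh ll (pvPos (5 : Int))) (pvManh rl (pvPos (5 : Int))) with hc | hc | hc
      · simp [pvStepA, pvStepB, List.flatten_append, hf, hl, hr, hbl, hbr, hc,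
              lt_asymm hc, ne_of_lt hc] <;> first
          | (constructor <;> first | decide | assumption)
          | decide
          | assumption
      · by_cases hh : hand = "left" <;>
          simp [pvStepA, pvStepB, List.flatten_append, hf, hl, hr, hbl, hbr, hc, hh,
                lt_irrefl] <;> first
          | (constructor <;> first | decide | assumption)
          | decide
          | assumption
      · simp [pvStepA, pvStepB, List.flatten_append, hf, hl, hr, hbl, hbr, hc,
              lt_asymm hc, ne_of_gt hc] <;> first
          | (constructor <;> first | decide | assumption)
          | decide
          | assumption
    · have hbl := pvBfs_eq_manh ll (List.mem_append_left _ hl) (8 : Int) (by decide)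
      have hbr := pvBfs_eq_manh rl (List.mem_append_right _ hr) (8 : Int) (by decide)
      rcases lt_trichotomy (pvManh ll (pvPos (8 : Int))) (pvManh rl (pvPos (8 : Int))) with hc | hc | hc
      · simp [pvStepA, pvStepB, List.flatten_append, hf, hl, hr, hbl, hbr, hc,
              lt_asymm hc, ne_of_lt hc] <;> first
          | (constructor <;> first | decide | assumption)
          | decide
          | assumption
      · by_cases hh : hand = "left" <;>
          simp [pvStepA, pvStepB, List.flatten_append, hf, hl, hr, hbl, hbr, hc, hh,
                lt_irrefl] <;> first
          | (constructor <;> first | decide | assumption)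
          | decide
          | assumption
      · simp [pvStepA, pvStepB, List.flatten_append, hf, hl, hr, hbl, hbr, hc,
              lt_asymm hc, ne_of_gt hc] <;> first
          | (constructor <;> first | decide | assumption)
          | decide
          | assumption
    · have hbl := pvBfs_eq_manh ll (List.mem_append_left _ hl) (0 : Int) (by decide)
      have hbr := pvBfs_eq_manh rl (List.mem_append_right _ hr) (0 : Int) (by decide)
      rcases lt_trichotomy (pvManh ll (pvPos (0 : Int))) (pvManh rl (pvPos (0 : Int))) with hc | hc | hc
      · simp [pvStepA, pvStepB, List.flatten_append, hf, hl, hr, hbl, hbr, hc,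
              lt_asymm hc, ne_of_lt hc] <;> first
          | (constructor <;> first | decide | assumption)
          | decide
          | assumption
      · by_cases hh : hand = "left" <;>
          simp [pvStepA, pvStepB, List.flatten_append, hf, hl, hr, hbl, hbr, hc, hh,
                lt_irrefl] <;> first
          | (constructor <;> first | decide | assumption)
          | decide
          | assumption
      · simp [pvStepA, pvStepB, List.flatten_append, hf, hl, hr, hbl, hbr, hc,
              lt_asymm hc, ne_of_gt hc] <;> first
          | (constructor <;> first | decide | assumption)
          | decide
          | assumption
  by_cases h3 : i = 3 ∨ i = 6 ∨ i = 9
  · rcases h3 with h | h | h <;> subst h <;>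
      simp [pvStepA, pvStepB, List.flatten_append, hf, hl, hr] <;> decide
  · simp [pvStepA, pvStepB, h1, h2, h3, hf, hl, hr]

lemma pvFold_eq (hand : String) : ∀ (ns : List Int) (ans : List Char) (out : List (List Char))
    (ll rl : Int × Int), ll ∈ pvLP → rl ∈ pvRP → ans = out.flatten →
    (ns.foldl (pvStepA hand) (ans, ll, rl)).1 =
      ((ns.foldl (pvStepB hand) (out, ll, rl)).1).flatten := by
  intro ns
  induction ns with
  | nil => intro ans out ll rl _ _ hf; simpa using hf
  | cons i ns ih =>
    intro ans out ll rl hl hr hf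
    obtain ⟨h1, h2, h3, h4⟩ := pvStep_eq hand ans out ll rl hl hr hf i
    simp only [List.foldl_cons]
    have hsa : pvStepA hand (ans, ll, rl) i =
        ((pvStepA hand (ans, ll, rl) i).1, (pvStepA hand (ans, ll, rl) i).2) := rfl
    have hsb : pvStepB hand (out, ll, rl) i =
        ((pvStepB hand (out, ll, rl) i).1, (pvStepB hand (out, ll, rl) i).2) := rfl
    rw [hsa, hsb, h2]
    have hp : (pvStepB hand (out, ll, rl) i).2 =
        ((pvStepB hand (out, ll, rl) i).2.1, (pvStepB hand (out, ll, rl) i).2.2) := rfl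
    rw [hp]
    exact ih _ _ _ _ h3 h4 h1

-- ===== VERDICT (by name: the statement is the Claim_ definition above) =====
theorem solution_spec : Claim_equal_solution := by
  intro numbers hand _
  unfold Spec_solution solution solution_alt
  rw [pvFold_eq hand numbers [] [] (3,0) (3,2) (by decide) (by decide) rfl]
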